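-- pv_equiv track=rewrite | github.com/FableYard/FableYard-Studio | core/src/components/adapters/mapper.py | _detect_model_format
-- ===== SOURCE A (Python) =====
-- def _detect_model_format(state_dict: dict) -> str:
--     """
--     Detect model format from state dict keys.
--
--     Returns:
--         'bfl-fused': BFL format with fused QKV (double_blocks.*.qkv)
--         'bfl-unfused': BFL format with unfused Q/K/V (double_blocks.*.to_q)
--         'diffusers': Diffusers format (transformer_blocks, single_transformer_blocks)
--     """
--     sample_keys = list(state_dict.keys())[:100]
--
--     # Check for diffusers format
--     if any('transformer_blocks' in key or 'single_transformer_blocks' in key for key in sample_keys):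
--         return 'diffusers'
--
--     # Check for BFL format
--     has_double_blocks = any('double_blocks' in key or 'single_blocks' in key for key in sample_keys)
--     if has_double_blocks:
--         # Determine if fused or unfused
--         has_qkv = any('.qkv.' in key for key in sample_keys)
--         has_to_q = any('.to_q.' in key for key in sample_keys)
--
--         if has_qkv:
--             return 'bfl-fused'
--         elif has_to_q:
--             return 'bfl-unfused'
--         else:
--             # Default to fused for BFL
--             return 'bfl-fused'
--
--     # Default to diffusers
--     return 'diffusers'
-- ===== SOURCE B (Python) =====
-- def _detect_model_format(state_dict: dict) -> str:
--     sample_keys = list(state_dict)[:100]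
--     saw_diffusers = saw_blocks = saw_qkv = saw_to_q = False
--     for key in sample_keys:
--         if 'transformer_blocks' in key or 'single_transformer_blocks' in key:
--             saw_diffusers = True
--         if 'double_blocks' in key or 'single_blocks' in key:
--             saw_blocks = True
--         if '.qkv.' in key:
--             saw_qkv = True
--         if '.to_q.' in key:
--             saw_to_q = True
--     if saw_diffusers:
--         return 'diffusers'
--     if saw_blocks:
--         if saw_qkv:
--             return 'bfl-fused'
--         elif saw_to_q:
--             return 'bfl-unfused'
--         else:
--             return 'bfl-fused'
--     return 'diffusers'
-- ===== Notes on version B (the rewrite author's own statement) =====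
-- stated objective: alternative
-- what changed: Replaces A's four separate any(...) scans over the sampled keys with one single pass that accumulates four boolean flags, then applies the same decision tree to the flags.
import Mathlib
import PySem

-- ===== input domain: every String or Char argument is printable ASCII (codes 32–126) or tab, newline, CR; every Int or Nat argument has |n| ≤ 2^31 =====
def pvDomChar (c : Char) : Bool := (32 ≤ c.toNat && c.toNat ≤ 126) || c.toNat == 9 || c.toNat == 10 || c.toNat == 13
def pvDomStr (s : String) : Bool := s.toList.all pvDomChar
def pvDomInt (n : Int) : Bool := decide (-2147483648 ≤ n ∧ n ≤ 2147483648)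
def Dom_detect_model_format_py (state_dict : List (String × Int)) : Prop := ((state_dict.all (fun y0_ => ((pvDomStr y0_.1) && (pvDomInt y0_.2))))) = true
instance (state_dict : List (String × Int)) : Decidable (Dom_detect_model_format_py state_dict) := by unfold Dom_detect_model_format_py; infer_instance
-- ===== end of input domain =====

-- B replaces A's four separate any(...) scans over the sampled keys with one pass accumulating
-- four boolean flags, then the same decision tree on the flags (objective: alternative).

-- ===== PORT A =====
def detect_model_format_py (state_dict : List (String × Int)) : String :=
  let sample_keys := PySem.List.slice ((PySem.Dict.ofList state_dict).keys) none (some 100)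
  if sample_keys.any (fun key =>
      PySem.Str.isIn "transformer_blocks" key || PySem.Str.isIn "single_transformer_blocks" key) then
    "diffusers"
  else
    let has_double_blocks := sample_keys.any (fun key =>
      PySem.Str.isIn "double_blocks" key || PySem.Str.isIn "single_blocks" key)
    if has_double_blocks then
      let has_qkv := sample_keys.any (fun key => PySem.Str.isIn ".qkv." key)
      let has_to_q := sample_keys.any (fun key => PySem.Str.isIn ".to_q." key)
      if has_qkv then "bfl-fused"
      else if has_to_q then "bfl-unfused"
      else "bfl-fused"
    else "diffusers"

-- ===== PORT B =====
def detect_model_format_py_alt (state_dict : List (String × Int)) : String :=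
  let sample_keys := PySem.List.slice ((PySem.Dict.ofList state_dict).keys) none (some 100)
  let flags := sample_keys.foldl (fun (st : Bool × Bool × Bool × Bool) key =>
      ( st.1 || (PySem.Str.isIn "transformer_blocks" key || PySem.Str.isIn "single_transformer_blocks" key),
        st.2.1 || (PySem.Str.isIn "double_blocks" key || PySem.Str.isIn "single_blocks" key),
        st.2.2.1 || PySem.Str.isIn ".qkv." key,
        st.2.2.2 || PySem.Str.isIn ".to_q." key))
    (false, false, false, false)
  if flags.1 then "diffusers"
  else if flags.2.1 then
    if flags.2.2.1 then "bfl-fused"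
    else if flags.2.2.2 then "bfl-unfused"
    else "bfl-fused"
  else "diffusers"

-- ===== PRECONDITION & SPEC =====
def Spec_detect_model_format_py (state_dict : List (String × Int)) (out : String) : Prop := out = detect_model_format_py_alt state_dict
instance (state_dict : List (String × Int)) (out : String) : Decidable (Spec_detect_model_format_py state_dict out) := by unfold Spec_detect_model_format_py; infer_instance

-- ===== CLAIM (what is proved, stated in full; the proofs are below) =====
def Claim_equal_detect_model_format_py : Prop := ∀ (state_dict : List (String × Int)), Dom_detect_model_format_py state_dict → Spec_detect_model_format_py state_dict (detect_model_format_py state_dict)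

-- ===== LEMMAS AND PROOFS =====

/-- The single-pass fold of B computes exactly the four `any` scans of A. -/
theorem flags_eq (ks : List String) (i : Bool × Bool × Bool × Bool) :
    ks.foldl (fun (st : Bool × Bool × Bool × Bool) key =>
      ( st.1 || (PySem.Str.isIn "transformer_blocks" key || PySem.Str.isIn "single_transformer_blocks" key),
        st.2.1 || (PySem.Str.isIn "double_blocks" key || PySem.Str.isIn "single_blocks" key),
        st.2.2.1 || PySem.Str.isIn ".qkv." key,
        st.2.2.2 || PySem.Str.isIn ".to_q." key)) i
    = ( i.1 || ks.any (fun key => PySem.Str.isIn "transformer_blocks" key || PySem.Str.isIn "single_transformer_blocks" key),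
        i.2.1 || ks.any (fun key => PySem.Str.isIn "double_blocks" key || PySem.Str.isIn "single_blocks" key),
        i.2.2.1 || ks.any (fun key => PySem.Str.isIn ".qkv." key),
        i.2.2.2 || ks.any (fun key => PySem.Str.isIn ".to_q." key)) := by
  induction ks generalizing i with
  | nil => simp
  | cons k t ih =>
    rw [List.foldl_cons, ih]
    simp [Bool.or_assoc]

-- ===== VERDICT (by name: the statement is the Claim_ definition above) =====
theorem detect_model_format_py_spec : Claim_equal_detect_model_format_py := by
  intro state_dict _
  unfold Spec_detect_model_format_py
  simp only [detect_model_format_py, detect_model_format_py_alt, flags_eq, Bool.false_or]
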